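-- pv_equiv track=rewrite | github.com/latikamehra/PythonProjects | CommonCodingProblems/RearrangeStringRecursion.py | rearrStr
-- ===== SOURCE A (Python) =====
-- def isAdditonValid(arrStr, ch, dist):
--     ln = len(arrStr)
--     flag = True
--     for i in range(0, ln) :
--         if ch == arrStr[i] :
--             if (ln - i) < dist :
--                 flag = False
--
--     return flag
--
-- def rearrStr (dist, unArrStr, arrStr = ""):
--     validStrsArr = []
--
--     unArrStrArr = list(unArrStr)
--
--     if len(unArrStrArr) == 0 :
--         return [arrStr]
--     else :
--         for i in range(0, len(unArrStrArr)) :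
--             ch = unArrStrArr[i]
--
--             vld = isAdditonValid(arrStr, ch, dist)
--
--             if vld == True :
--
--                 newArrStr = arrStr + ch
--                 newUnArrStrArr = unArrStrArr.copy()
--                 newUnArrStrArr.pop(i)
--
--                 newUnArrStr = ''.join(newUnArrStrArr)
--
--                 validStrs = rearrStr (dist, newUnArrStr, newArrStr)
--
--                 validStrsArr += validStrs
--
--     return validStrsArr
-- ===== SOURCE B (Python) =====
-- def rearrStr(dist, unArrStr, arrStr=""):
--     # Level-synchronous worklist instead of recursion: each round extends every
--     # partial arrangement by one remaining character; a character is admissible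
--     # iff it does not occur among the last (dist-1) characters already placed.
--     frontier = [(arrStr, list(unArrStr))]
--     for _ in range(len(unArrStr)):
--         nxt = []
--         for built, rest in frontier:
--             tail = built[max(len(built) - dist + 1, 0):]
--             for i in range(len(rest)):
--                 ch = rest[i]
--                 if ch not in tail:
--                     nxt.append((built + ch, rest[:i] + rest[i + 1:]))
--         frontier = nxt
--     return [built for built, _ in frontier]
-- ===== Notes on version B (the rewrite author's own statement) =====
-- stated objective: alternative
-- what changed: Replaces A's recursive backtracking (with a helper that rescans the whole built prefix for each candidate character) by an iterative level-synchronous worklist of (built, remaining) states, admitting a character iff it does not occur among the last dist-1 placed characters (a single suffix-membership test).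
import Mathlib
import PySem

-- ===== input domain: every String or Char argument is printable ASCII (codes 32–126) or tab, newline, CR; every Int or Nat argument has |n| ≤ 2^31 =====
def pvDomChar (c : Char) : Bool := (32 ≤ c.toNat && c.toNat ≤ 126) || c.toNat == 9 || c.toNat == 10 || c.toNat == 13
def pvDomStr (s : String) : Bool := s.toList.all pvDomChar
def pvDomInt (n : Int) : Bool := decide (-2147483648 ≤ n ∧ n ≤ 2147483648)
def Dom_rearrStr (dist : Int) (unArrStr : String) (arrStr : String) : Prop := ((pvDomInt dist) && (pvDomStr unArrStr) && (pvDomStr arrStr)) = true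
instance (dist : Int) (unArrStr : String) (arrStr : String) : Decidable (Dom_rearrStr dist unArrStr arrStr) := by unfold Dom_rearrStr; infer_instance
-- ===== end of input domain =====

-- B replaces A's recursion by a level-synchronous worklist loop and A's full-prefix
-- scan by a membership test in the last (dist-1) placed characters (objective: alternative).

-- ===== PORT A =====
-- strings are carried as their List Char code points (PySem convention) and re-joined at the end
def isAdditonValid (arrStr : List Char) (ch : Char) (dist : Int) : Bool :=
  let ln : Int := arrStr.length
  (PySem.List.pyRange 0 ln 1).foldl
    (fun flag i =>
      if PySem.List.pyGet? arrStr i == some ch then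
        if ln - i < dist then false else flag
      else flag)
    true

def rearrAux (dist : Int) (un : List Char) (arrStr : List Char) : List (List Char) :=
  if un.length = 0 then [arrStr]
  else
    (List.range un.length).attach.foldl
      (fun acc i =>
        let ch := un.getD i.1 ' '
        if isAdditonValid arrStr ch dist = true then
          acc ++ rearrAux dist (un.eraseIdx i.1) (arrStr ++ [ch])
        else acc)
      []
termination_by un.length
decreasing_by
  have hi : i.1 < un.length := List.mem_range.mp i.2
  have := List.length_eraseIdx_of_lt hi
  omega

def rearrStr (dist : Int) (unArrStr : String) (arrStr : String) : List String :=
  (rearrAux dist unArrStr.toList arrStr.toList).map String.ofList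

-- ===== PORT B =====
def rearrStr_alt (dist : Int) (unArrStr : String) (arrStr : String) : List String :=
  let final :=
    (List.range unArrStr.toList.length).foldl
      (fun frontier _ =>
        frontier.foldl
          (fun nxt st =>
            let tail := PySem.List.slice st.1 (some (max ((st.1.length : Int) - dist + 1) 0)) none
            (List.range st.2.length).foldl
              (fun nxt2 (i : Nat) =>
                let ch := st.2.getD i ' '
                if ch ∈ tail then nxt2
                else
                  nxt2 ++ [(st.1 ++ [ch],
                    PySem.List.slice st.2 none (some (i : Int)) ++
                      PySem.List.slice st.2 (some ((i : Int) + 1)) none)])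
              nxt)
          [])
      [(arrStr.toList, unArrStr.toList)]
  final.map (fun st => String.ofList st.1)

-- ===== PRECONDITION & SPEC =====
def Spec_rearrStr (dist : Int) (unArrStr : String) (arrStr : String) (out : List String) : Prop := out = rearrStr_alt dist unArrStr arrStr
instance (dist : Int) (unArrStr : String) (arrStr : String) (out : List String) : Decidable (Spec_rearrStr dist unArrStr arrStr out) := by unfold Spec_rearrStr; infer_instance

-- ===== CLAIM (what is proved, stated in full; the proofs are below) =====
def Claim_equal_rearrStr : Prop := ∀ (dist : Int) (unArrStr : String) (arrStr : String), Dom_rearrStr dist unArrStr arrStr → Spec_rearrStr dist unArrStr arrStr (rearrStr dist unArrStr arrStr)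

-- ===== LEMMAS AND PROOFS =====

-- the one-state expansion both loops perform, in flatMap normal form
def pvExpand (dist : Int) (st : List Char × List Char) : List (List Char × List Char) :=
  (List.range st.2.length).flatMap (fun i =>
    if isAdditonValid st.1 (st.2.getD i ' ') dist = true then
      [(st.1 ++ [st.2.getD i ' '], st.2.eraseIdx i)]
    else [])

def pvStep (dist : Int) (fr : List (List Char × List Char)) : List (List Char × List Char) :=
  fr.flatMap (pvExpand dist)

-- A's validity scan equals "ch does not occur among the last dist-1 placed characters"
lemma isAdditonValid_eq (arr : List Char) (ch : Char) (dist : Int) :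
    isAdditonValid arr ch dist
      = !decide (ch ∈ PySem.List.slice arr (some (max ((arr.length : Int) - dist + 1) 0)) none) := by
  simp only [isAdditonValid]
  rw [PySem.List.slice_from arr (le_max_right _ _)]
  have hbody : (fun (flag : Bool) (i : Int) =>
      if PySem.List.pyGet? arr i == some ch then
        if (arr.length : Int) - i < dist then false else flag
      else flag)
      = (fun flag i =>
          if (PySem.List.pyGet? arr i == some ch && decide ((arr.length : Int) - i < dist)) = true then
            false
          else flag) := by
    funext flag i
    by_cases h1 : PySem.List.pyGet? arr i = some ch <;> by_cases h2 : (arr.length : Int) - i < dist <;>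
      simp [h1, h2]
  rw [hbody, PySem.List.foldl_if_false_eq]
  rw [PySem.List.pyRange_one]
  simp only [Bool.true_and, List.any_map, sub_zero, Int.toNat_natCast]
  congr 1
  rw [Bool.eq_iff_iff]
  simp only [List.any_eq_true, Function.comp, zero_add, PySem.List.pyGet?_natCast,
    Bool.and_eq_true, beq_iff_eq, decide_eq_true_eq, List.mem_range]
  constructor
  · rintro ⟨k, hk, hget, hlt⟩
    rw [List.mem_iff_getElem?]
    set c := max ((arr.length : Int) - dist + 1) 0 with hc
    have hck : c.toNat ≤ k := by omega
    exact ⟨k - c.toNat, by rw [List.getElem?_drop, Nat.add_sub_cancel' hck]; exact hget⟩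
  · intro hmem
    rw [List.mem_iff_getElem?] at hmem
    obtain ⟨n, hn⟩ := hmem
    rw [List.getElem?_drop] at hn
    have hlt : _ + n < arr.length := (List.getElem?_eq_some_iff.mp hn).1
    exact ⟨_ + n, hlt, hn, by omega⟩

-- B's inner loop over one state appends exactly pvExpand of that state
lemma bInner_eq (dist : Int) (st : List Char × List Char) (nxt : List (List Char × List Char)) :
    (List.range st.2.length).foldl
      (fun nxt2 (i : Nat) =>
        let ch := st.2.getD i ' '
        if ch ∈ PySem.List.slice st.1 (some (max ((st.1.length : Int) - dist + 1) 0)) none then nxt2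
        else
          nxt2 ++ [(st.1 ++ [ch],
            PySem.List.slice st.2 none (some (i : Int)) ++
              PySem.List.slice st.2 (some ((i : Int) + 1)) none)])
      nxt
    = nxt ++ pvExpand dist st := by
  have hbody : (fun (nxt2 : List (List Char × List Char)) (i : Nat) =>
      let ch := st.2.getD i ' '
      if ch ∈ PySem.List.slice st.1 (some (max ((st.1.length : Int) - dist + 1) 0)) none then nxt2
      else
        nxt2 ++ [(st.1 ++ [ch],
          PySem.List.slice st.2 none (some (i : Int)) ++
            PySem.List.slice st.2 (some ((i : Int) + 1)) none)])
      = (fun nxt2 i =>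
          nxt2 ++ (if isAdditonValid st.1 (st.2.getD i ' ') dist = true then
            [(st.1 ++ [st.2.getD i ' '], st.2.eraseIdx i)]
          else [])) := by
    funext nxt2 i
    have hcast : ((i : Int) + 1) = (((i + 1 : Nat)) : Int) := by push_cast; ring
    simp only [isAdditonValid_eq]
    by_cases hm : st.2.getD i ' '
        ∈ PySem.List.slice st.1 (some (max ((st.1.length : Int) - dist + 1) 0)) none
    · rw [if_pos hm, if_neg (by simpa using hm), List.append_nil]
    · rw [if_neg hm, if_pos (by simpa using hm), PySem.List.slice_to_natCast, hcast,
        PySem.List.slice_from_natCast, ← List.eraseIdx_eq_take_drop_succ]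
  rw [hbody, PySem.List.foldl_append_eq_flatMap]
  rfl

-- B's middle loop over the frontier is pvStep
lemma bStep_eq (dist : Int) (fr : List (List Char × List Char)) :
    (fr.foldl
      (fun nxt st =>
        (List.range st.2.length).foldl
          (fun nxt2 (i : Nat) =>
            let ch := st.2.getD i ' '
            if ch ∈ PySem.List.slice st.1 (some (max ((st.1.length : Int) - dist + 1) 0)) none then nxt2
            else
              nxt2 ++ [(st.1 ++ [ch],
                PySem.List.slice st.2 none (some (i : Int)) ++
                  PySem.List.slice st.2 (some ((i : Int) + 1)) none)])
          nxt)
      [])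
    = pvStep dist fr := by
  have h : (fun (nxt : List (List Char × List Char)) (st : List Char × List Char) =>
      (List.range st.2.length).foldl
        (fun nxt2 (i : Nat) =>
          let ch := st.2.getD i ' '
          if ch ∈ PySem.List.slice st.1 (some (max ((st.1.length : Int) - dist + 1) 0)) none then nxt2
          else
            nxt2 ++ [(st.1 ++ [ch],
              PySem.List.slice st.2 none (some (i : Int)) ++
                PySem.List.slice st.2 (some ((i : Int) + 1)) none)])
        nxt)
      = (fun nxt st => nxt ++ pvExpand dist st) := by
    funext nxt st
    exact bInner_eq dist st nxt
  rw [h, PySem.List.foldl_append_eq_flatMap]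
  rfl

-- A's body in flatMap normal form
lemma rearrAux_eq_flatMap (dist : Int) (un arr : List Char) (h : un ≠ []) :
    rearrAux dist un arr
      = (List.range un.length).flatMap (fun i =>
          if isAdditonValid arr (un.getD i ' ') dist = true then
            rearrAux dist (un.eraseIdx i) (arr ++ [un.getD i ' '])
          else []) := by
  rw [rearrAux]
  rw [if_neg (by simpa using h)]
  have hbody : (fun (acc : List (List Char)) (i : { x // x ∈ List.range un.length }) =>
      let ch := un.getD i.1 ' '
      if isAdditonValid arr ch dist = true then
        acc ++ rearrAux dist (un.eraseIdx i.1) (arr ++ [ch])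
      else acc)
      = (fun acc i =>
          acc ++ (if isAdditonValid arr (un.getD i.1 ' ') dist = true then
            rearrAux dist (un.eraseIdx i.1) (arr ++ [un.getD i.1 ' '])
          else [])) := by
    funext acc i
    by_cases hv : isAdditonValid arr (un.getD i.1 ' ') dist = true
    · rw [if_pos hv, if_pos hv]
    · rw [if_neg hv, if_neg hv, List.append_nil]
  rw [hbody, PySem.List.foldl_append_eq_flatMap, List.nil_append]
  conv_rhs => rw [← List.attach_map_subtype_val (List.range un.length)]
  rw [List.flatMap_map]

lemma pvStep_append (dist : Int) (l1 l2 : List (List Char × List Char)) :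
    pvStep dist (l1 ++ l2) = pvStep dist l1 ++ pvStep dist l2 := by
  simp [pvStep]

lemma pvStep_iter_append (dist : Int) (n : Nat) (l1 l2 : List (List Char × List Char)) :
    (pvStep dist)^[n] (l1 ++ l2) = (pvStep dist)^[n] l1 ++ (pvStep dist)^[n] l2 := by
  induction n generalizing l1 l2 with
  | zero => simp
  | succ n ih => simp [Function.iterate_succ_apply, pvStep_append, ih]

lemma pvStep_iter_nil (dist : Int) (n : Nat) : (pvStep dist)^[n] [] = [] := by
  induction n with
  | zero => rfl
  | succ n ih => simp [Function.iterate_succ_apply, pvStep, ih]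

lemma pvStep_iter_flatMap {α : Type} (dist : Int) (n : Nat) (l : List α)
    (g : α → List (List Char × List Char)) :
    (pvStep dist)^[n] (l.flatMap g) = l.flatMap (fun x => (pvStep dist)^[n] (g x)) := by
  induction l with
  | nil => simp [pvStep_iter_nil]
  | cons x xs ih => simp [List.flatMap_cons, pvStep_iter_append, ih]

lemma foldl_range_iterate {α : Type} (f : α → α) (n : Nat) (x : α) :
    (List.range n).foldl (fun y _ => f y) x = f^[n] x := by
  induction n with
  | zero => rfl
  | succ n ih => rw [List.range_succ, List.foldl_append, ih, Function.iterate_succ_apply']; rfl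

-- the key level-synchronous-BFS = DFS lemma
lemma pvIter_singleton (dist : Int) (n : Nat) :
    ∀ (arr un : List Char), un.length = n →
      (pvStep dist)^[n] [(arr, un)]
        = (rearrAux dist un arr).map (fun s => (s, ([] : List Char))) := by
  induction n with
  | zero =>
    intro arr un h
    have : un = [] := List.eq_nil_of_length_eq_zero h
    subst this
    rw [rearrAux]
    simp
  | succ n ih =>
    intro arr un h
    have hne : un ≠ [] := by intro e; subst e; simp at h
    rw [Function.iterate_succ_apply]
    have h1 : pvStep dist [(arr, un)] = pvExpand dist (arr, un) := by simp [pvStep]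
    rw [h1]
    simp only [pvExpand]
    rw [pvStep_iter_flatMap, rearrAux_eq_flatMap dist un arr hne, List.map_flatMap]
    apply List.flatMap_congr
    intro i hi
    have hilt : i < un.length := List.mem_range.mp hi
    by_cases hv : isAdditonValid arr (un.getD i ' ') dist = true
    · rw [if_pos hv, if_pos hv]
      exact ih _ _ (by rw [List.length_eraseIdx_of_lt hilt, h]; omega)
    · rw [if_neg hv, if_neg hv, pvStep_iter_nil, List.map_nil]

theorem rearrStr_eq_alt (dist : Int) (unArrStr arrStr : String) :
    rearrStr dist unArrStr arrStr = rearrStr_alt dist unArrStr arrStr := by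
  simp only [rearrStr, rearrStr_alt]
  have hmid : (fun (frontier : List (List Char × List Char)) (_ : Nat) =>
      frontier.foldl
        (fun nxt st =>
          (List.range st.2.length).foldl
            (fun nxt2 (i : Nat) =>
              let ch := st.2.getD i ' '
              if ch ∈ PySem.List.slice st.1 (some (max ((st.1.length : Int) - dist + 1) 0)) none then
                nxt2
              else
                nxt2 ++ [(st.1 ++ [ch],
                  PySem.List.slice st.2 none (some (i : Int)) ++
                    PySem.List.slice st.2 (some ((i : Int) + 1)) none)])
            nxt)
        [])
      = (fun frontier _ => pvStep dist frontier) := by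
    funext frontier i
    exact bStep_eq dist frontier
  rw [hmid, foldl_range_iterate,
    pvIter_singleton dist unArrStr.toList.length arrStr.toList unArrStr.toList rfl,
    List.map_map]
  rfl

-- ===== VERDICT (by name: the statement is the Claim_ definition above) =====
theorem rearrStr_spec : Claim_equal_rearrStr := by
  intro dist un arr _
  unfold Spec_rearrStr
  exact rearrStr_eq_alt dist un arr
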